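-- pv_equiv track=rewrite | github.com/rahulsinghal1904/cart-advisor-agent | e_commerce_agent/src/e_commerce_agent/providers/price_scraper.py | _are_compatible_product_types
-- ===== SOURCE A (Python) =====
-- def _are_compatible_product_types(type1: str, type2: str) -> bool:
--     """Check if two product types are in the same or compatible categories."""
--     # Define groups of compatible product types
--     compatibility_groups = [
--         # Footwear
--         {'shoes', 'sneaker', 'trainer', 'boot'},
--         # Upper body clothing
--         {'shirt', 'tee', 't-shirt', 'sweater', 'jacket', 'hoodie'},
--         # Lower body clothing
--         {'pants', 'trouser', 'jean', 'shorts'},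
--         # Computing devices
--         {'laptop', 'notebook', 'computer'},
--         # Displays
--         {'monitor', 'display', 'screen', 'tv', 'television'},
--         # Mobile devices
--         {'smartphone', 'phone', 'tablet', 'ipad'},
--         # Bedding
--         {'pillow', 'pillowcase', 'sheet', 'bedding', 'duvet', 'comforter', 'blanket', 'mattress'},
--         # Furniture
--         {'chair', 'sofa', 'couch', 'table', 'desk', 'cabinet'}
--     ]
--
--     # Check if both types are in the same compatibility group
--     for group in compatibility_groups:
--         if type1 in group and type2 in group:
--             return True
--
--     return False
-- ===== SOURCE B (Python) =====
-- # B: one flat word -> group-index dict built once; the body is two O(1) lookups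
-- # and a comparison instead of A's loop over groups with membership scans.
-- _GROUP_OF = {}
-- for _i, _group in enumerate([
--     ('shoes', 'sneaker', 'trainer', 'boot'),
--     ('shirt', 'tee', 't-shirt', 'sweater', 'jacket', 'hoodie'),
--     ('pants', 'trouser', 'jean', 'shorts'),
--     ('laptop', 'notebook', 'computer'),
--     ('monitor', 'display', 'screen', 'tv', 'television'),
--     ('smartphone', 'phone', 'tablet', 'ipad'),
--     ('pillow', 'pillowcase', 'sheet', 'bedding', 'duvet', 'comforter', 'blanket', 'mattress'),
--     ('chair', 'sofa', 'couch', 'table', 'desk', 'cabinet'),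
-- ]):
--     for _word in _group:
--         _GROUP_OF[_word] = _i
--
--
-- def _are_compatible_product_types(type1: str, type2: str) -> bool:
--     """Check if two product types are in the same or compatible categories."""
--     g = _GROUP_OF.get(type1)
--     return g is not None and g == _GROUP_OF.get(type2)
-- ===== Notes on version B (the rewrite author's own statement) =====
-- stated objective: simpler
-- what changed: Replaced the loop over eight compatibility sets (two membership tests per group) with a single precomputed word-to-group-index dict, so the body is two lookups and one equality comparison with no loop.
import Mathlib
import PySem

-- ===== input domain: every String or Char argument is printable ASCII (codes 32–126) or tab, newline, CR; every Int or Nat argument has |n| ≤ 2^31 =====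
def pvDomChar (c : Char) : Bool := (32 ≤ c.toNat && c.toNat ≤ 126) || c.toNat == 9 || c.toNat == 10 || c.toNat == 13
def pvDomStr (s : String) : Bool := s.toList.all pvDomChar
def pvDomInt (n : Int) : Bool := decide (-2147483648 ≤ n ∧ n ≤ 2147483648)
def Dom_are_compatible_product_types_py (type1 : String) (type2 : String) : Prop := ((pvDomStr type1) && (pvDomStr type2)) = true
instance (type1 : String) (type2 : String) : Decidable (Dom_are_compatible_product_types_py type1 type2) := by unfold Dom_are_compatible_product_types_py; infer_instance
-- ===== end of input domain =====

-- B replaces A's loop over eight sets by one flat word→group-index dict and two lookups (objective: simpler).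

-- ===== PORT A =====
-- the literal list of compatibility groups (Python sets)
def pvGroupsA : List (PySem.Set String) :=
  [ PySem.Set.ofList ["shoes", "sneaker", "trainer", "boot"],
    PySem.Set.ofList ["shirt", "tee", "t-shirt", "sweater", "jacket", "hoodie"],
    PySem.Set.ofList ["pants", "trouser", "jean", "shorts"],
    PySem.Set.ofList ["laptop", "notebook", "computer"],
    PySem.Set.ofList ["monitor", "display", "screen", "tv", "television"],
    PySem.Set.ofList ["smartphone", "phone", "tablet", "ipad"],
    PySem.Set.ofList ["pillow", "pillowcase", "sheet", "bedding", "duvet", "comforter", "blanket", "mattress"],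
    PySem.Set.ofList ["chair", "sofa", "couch", "table", "desk", "cabinet"] ]

-- A's 'for group in …: if type1 in group and type2 in group: return True / return False'
def pvLoopA (type1 type2 : String) : List (PySem.Set String) → Bool
  | [] => false
  | g :: rest =>
      if PySem.Set.contains g type1 && PySem.Set.contains g type2 then true
      else pvLoopA type1 type2 rest

def are_compatible_product_types_py (type1 : String) (type2 : String) : Bool :=
  pvLoopA type1 type2 pvGroupsA

-- ===== PORT B =====
-- B's module-level dict _GROUP_OF (built by insertion, all keys distinct)
def pvGroupOf : PySem.Dict String Int :=
  PySem.Dict.ofList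
    [ ("shoes", 0), ("sneaker", 0), ("trainer", 0), ("boot", 0),
      ("shirt", 1), ("tee", 1), ("t-shirt", 1), ("sweater", 1), ("jacket", 1), ("hoodie", 1),
      ("pants", 2), ("trouser", 2), ("jean", 2), ("shorts", 2),
      ("laptop", 3), ("notebook", 3), ("computer", 3),
      ("monitor", 4), ("display", 4), ("screen", 4), ("tv", 4), ("television", 4),
      ("smartphone", 5), ("phone", 5), ("tablet", 5), ("ipad", 5),
      ("pillow", 6), ("pillowcase", 6), ("sheet", 6), ("bedding", 6), ("duvet", 6),
      ("comforter", 6), ("blanket", 6), ("mattress", 6),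
      ("chair", 7), ("sofa", 7), ("couch", 7), ("table", 7), ("desk", 7), ("cabinet", 7) ]

-- 'g = _GROUP_OF.get(type1); return g is not None and g == _GROUP_OF.get(type2)'
def are_compatible_product_types_py_alt (type1 : String) (type2 : String) : Bool :=
  match pvGroupOf.get? type1 with
  | none => false
  | some g =>
      match pvGroupOf.get? type2 with
      | none => false
      | some h => g == h

-- ===== PRECONDITION & SPEC =====
def Spec_are_compatible_product_types_py (type1 : String) (type2 : String) (out : Bool) : Prop := out = are_compatible_product_types_py_alt type1 type2
instance (type1 : String) (type2 : String) (out : Bool) : Decidable (Spec_are_compatible_product_types_py type1 type2 out) := by unfold Spec_are_compatible_product_types_py; infer_instance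

-- ===== CLAIM (what is proved, stated in full; the proofs are below) =====
def Claim_equal_are_compatible_product_types_py : Prop := ∀ (type1 : String) (type2 : String), Dom_are_compatible_product_types_py type1 type2 → Spec_are_compatible_product_types_py type1 type2 (are_compatible_product_types_py type1 type2)

-- ===== LEMMAS AND PROOFS =====

-- the groups as plain word lists
def pvPlainGroups : List (List String) :=
  [ ["shoes", "sneaker", "trainer", "boot"],
    ["shirt", "tee", "t-shirt", "sweater", "jacket", "hoodie"],
    ["pants", "trouser", "jean", "shorts"],
    ["laptop", "notebook", "computer"],
    ["monitor", "display", "screen", "tv", "television"],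
    ["smartphone", "phone", "tablet", "ipad"],
    ["pillow", "pillowcase", "sheet", "bedding", "duvet", "comforter", "blanket", "mattress"],
    ["chair", "sofa", "couch", "table", "desk", "cabinet"] ]

-- flatten a group list into (word, group-index) pairs starting at index i
def pvFlat : List (List String) → Int → List (String × Int)
  | [], _ => []
  | g :: r, i => g.map (fun w => (w, i)) ++ pvFlat r (i + 1)

-- first-match association lookup, shaped like PySem.Dict.get?
def pvLookup (l : List (String × Int)) (t : String) : Option Int :=
  (l.find? (fun p => p.1 == t)).map (·.2)

theorem pvLookup_append (a b : List (String × Int)) (t : String) :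
    pvLookup (a ++ b) t =
      (match pvLookup a t with | some v => some v | none => pvLookup b t) := by
  simp only [pvLookup, List.find?_append]
  cases a.find? (fun p => p.1 == t) <;> simp

theorem pvLookup_map_const (g : List String) (i : Int) (t : String) :
    pvLookup (g.map (fun w => (w, i))) t = if t ∈ g then some i else none := by
  induction g with
  | nil => simp [pvLookup]
  | cons w r ih =>
      by_cases h : w = t
      · subst h; simp [pvLookup]
      · have hb : (w == t) = false := by simpa using h
        simp only [List.map_cons, pvLookup, List.find?_cons, hb] at ih ⊢
        rw [ih]
        have ht : ¬ t = w := fun e => h e.symm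
        by_cases hm : t ∈ r
        · simp [hm]
        · simp [hm, ht]

theorem pvLookup_flat_ge (t : String) :
    ∀ (gs : List (List String)) (i v : Int),
      pvLookup (pvFlat gs i) t = some v → i ≤ v := by
  intro gs
  induction gs with
  | nil => intro i v h; simp [pvFlat, pvLookup] at h
  | cons g r ih =>
      intro i v h
      rw [pvFlat, pvLookup_append, pvLookup_map_const] at h
      by_cases hc : t ∈ g
      · rw [if_pos hc] at h
        simp only [Option.some.injEq] at h
        omega
      · rw [if_neg hc] at h
        have := ih (i + 1) v h
        omega

theorem pvLoopA_none_left (t1 t2 : String) :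
    ∀ gs : List (List String), t1 ∉ gs.flatten → pvLoopA t1 t2 gs = false := by
  intro gs
  induction gs with
  | nil => intro _; rfl
  | cons g r ih =>
      intro h
      simp only [List.flatten_cons, List.mem_append, not_or] at h
      simp [pvLoopA, PySem.Set.contains, h.1, ih h.2]

theorem pvLoopA_none_right (t1 t2 : String) :
    ∀ gs : List (List String), t2 ∉ gs.flatten → pvLoopA t1 t2 gs = false := by
  intro gs
  induction gs with
  | nil => intro _; rfl
  | cons g r ih =>
      intro h
      simp only [List.flatten_cons, List.mem_append, not_or] at h
      simp [pvLoopA, PySem.Set.contains, h.1, ih h.2]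

theorem pvMain (t1 t2 : String) :
    ∀ (gs : List (List String)) (i : Int), gs.flatten.Nodup →
      pvLoopA t1 t2 gs =
        (match pvLookup (pvFlat gs i) t1, pvLookup (pvFlat gs i) t2 with
         | some a, some b => a == b
         | _, _ => false) := by
  intro gs
  induction gs with
  | nil => intro i _; simp [pvLoopA, pvFlat, pvLookup]
  | cons g r ih =>
      intro i hnd
      simp only [List.flatten_cons] at hnd
      have hndr := hnd.of_append_right
      have hdisj := List.disjoint_of_nodup_append hnd
      rw [pvFlat, pvLookup_append, pvLookup_append, pvLookup_map_const, pvLookup_map_const]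
      by_cases h1 : t1 ∈ g <;> by_cases h2 : t2 ∈ g
      · simp [pvLoopA, PySem.Set.contains, h1, h2]
      · -- t1 ∈ g, t2 ∉ g : the loop never fires later; the dict indices differ
        have hL := pvLoopA_none_left t1 t2 r (fun hmem => hdisj h1 hmem)
        rcases hv : pvLookup (pvFlat r (i + 1)) t2 with _ | v
        · simp [pvLoopA, PySem.Set.contains, h1, h2, hL]
        · have hge := pvLookup_flat_ge t2 r (i + 1) v hv
          simp [pvLoopA, PySem.Set.contains, h1, h2, hL]
          omega
      · have hL := pvLoopA_none_right t1 t2 r (fun hmem => hdisj h2 hmem)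
        rcases hv : pvLookup (pvFlat r (i + 1)) t1 with _ | v
        · simp [pvLoopA, PySem.Set.contains, h1, h2, hL]
        · have hge := pvLookup_flat_ge t1 r (i + 1) v hv
          simp [pvLoopA, PySem.Set.contains, h1, h2, hL]
          omega
      · have := ih (i + 1) hndr
        simp only [pvLoopA, PySem.Set.contains] at this ⊢
        simpa [h1, h2] using this

set_option maxRecDepth 8192 in
theorem pvGroupsA_eq : pvGroupsA = pvPlainGroups := by decide

set_option maxRecDepth 8192 in
theorem pvNodup : pvPlainGroups.flatten.Nodup := by decide

set_option maxRecDepth 8192 in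
theorem pvDict_eq : pvGroupOf = PySem.Dict.mk (pvFlat pvPlainGroups 0) := by decide

theorem pvGet_eq (t : String) : pvGroupOf.get? t = pvLookup (pvFlat pvPlainGroups 0) t := by
  rw [pvDict_eq]; rfl

-- ===== VERDICT (by name: the statement is the Claim_ definition above) =====
theorem are_compatible_product_types_py_spec : Claim_equal_are_compatible_product_types_py := by
  intro t1 t2 _
  unfold Spec_are_compatible_product_types_py
  unfold are_compatible_product_types_py are_compatible_product_types_py_alt
  rw [pvGroupsA_eq, pvGet_eq, pvGet_eq, pvMain t1 t2 pvPlainGroups 0 pvNodup]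
  rcases pvLookup (pvFlat pvPlainGroups 0) t1 with _ | a <;>
    rcases pvLookup (pvFlat pvPlainGroups 0) t2 with _ | b <;> rfl
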